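-- pv_equiv track=rewrite | github.com/MGD2003D/Algorithms | 1sem/1/2/2.py | insertion_sort_and_track_positions
-- ===== SOURCE A (Python) =====
-- def insertion_sort_and_track_positions(A):
--     length = len(A)
--     positions = [0] * length
--
--     for j in range(length):
--         key = A[j]
--         i = j - 1
--         while i >= 0 and A[i] > key:
--             A[i + 1] = A[i]
--             i -= 1
--         A[i + 1] = key
--         positions[j] = i + 2
--
--     return positions
-- ===== SOURCE B (Python) =====
-- def insertion_sort_and_track_positions(A):
--     # positions[j] is 1 + number of earlier elements <= A[j]; no mutation of A.
--     return [1 + sum(1 for y in A[:j] if y <= x) for j, x in enumerate(A)]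
-- ===== Notes on version B (the rewrite author's own statement) =====
-- stated objective: simpler
-- what changed: B replaces the in-place shifting insertion-sort loop by directly counting, for each element, the earlier elements that are <= it (the insertion position is 1 + that count); A's array mutation disappears entirely.
import Mathlib
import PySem

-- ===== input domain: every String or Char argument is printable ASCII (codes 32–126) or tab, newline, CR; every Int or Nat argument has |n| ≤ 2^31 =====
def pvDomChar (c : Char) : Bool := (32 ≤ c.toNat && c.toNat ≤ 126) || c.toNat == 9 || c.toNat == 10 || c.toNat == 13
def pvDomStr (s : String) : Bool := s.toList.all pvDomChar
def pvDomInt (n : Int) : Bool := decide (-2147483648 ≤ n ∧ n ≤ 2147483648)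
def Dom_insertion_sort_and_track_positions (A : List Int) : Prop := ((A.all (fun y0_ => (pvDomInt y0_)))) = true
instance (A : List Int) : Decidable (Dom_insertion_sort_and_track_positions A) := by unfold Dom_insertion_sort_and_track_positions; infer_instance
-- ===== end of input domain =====

-- B replaces A's in-place shifting insertion sort by directly counting, for each element,
-- the earlier elements ≤ it (objective: simpler). A mutates its argument list in place;
-- B does not — the equivalence proved here is about the RETURN value only.


-- ===== PORT A =====
-- the inner 'while i >= 0 and A[i] > key: A[i+1] = A[i]; i -= 1' loop
def pvShiftA (lst : List Int) (key : Int) (i : Int) : List Int × Int :=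
  if h : 0 ≤ i ∧ key < PySem.List.pyGetD lst i 0 then
    pvShiftA (PySem.List.pySetD lst (i + 1) (PySem.List.pyGetD lst i 0)) key (i - 1)
  else
    (lst, i)
termination_by (i + 1).toNat
decreasing_by omega

-- one iteration of the 'for j in range(length)' loop; state = (A, positions)
def pvStepA (st : List Int × List Int) (j : Int) : List Int × List Int :=
  let key := PySem.List.pyGetD st.1 j 0
  let r := pvShiftA st.1 key (j - 1)
  (PySem.List.pySetD r.1 (r.2 + 1) key, PySem.List.pySetD st.2 j (r.2 + 2))

def insertion_sort_and_track_positions (A : List Int) : List Int :=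
  ((PySem.List.pyRange 0 (A.length : Int) 1).foldl pvStepA
    (A, List.replicate A.length 0)).2

-- ===== PORT B =====
def insertion_sort_and_track_positions_alt (A : List Int) : List Int :=
  (PySem.List.enumerate A 0).map (fun jx =>
    1 + ((PySem.List.slice A none (some jx.1)).map
          (fun y => if y ≤ jx.2 then (1 : Int) else 0)).sum)

-- ===== PRECONDITION & SPEC =====
def Spec_insertion_sort_and_track_positions (A : List Int) (out : List Int) : Prop := out = insertion_sort_and_track_positions_alt A
instance (A : List Int) (out : List Int) : Decidable (Spec_insertion_sort_and_track_positions A out) := by unfold Spec_insertion_sort_and_track_positions; infer_instance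

-- ===== CLAIM (what is proved, stated in full; the proofs are below) =====
def Claim_equal_insertion_sort_and_track_positions : Prop := ∀ (A : List Int), Dom_insertion_sort_and_track_positions A → Spec_insertion_sort_and_track_positions A (insertion_sort_and_track_positions A)

-- ===== LEMMAS AND PROOFS =====

-- ordered insert of `key` into a sorted list, after any elements equal to `key`
def pvIns (s : List Int) (key : Int) : List Int :=
  s.take (s.countP (fun y => y ≤ key)) ++ key :: s.drop (s.countP (fun y => y ≤ key))

-- the sorted prefix after the first m outer iterations
def pvPfx (A : List Int) (m : Nat) : List Int := (A.take m).foldl pvIns []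

-- the position recorded for index j
def pvPos (A : List Int) (j : Nat) : Int :=
  1 + ((A.take j).countP (fun y => y ≤ A.getD j 0) : Int)

lemma pvIns_perm (s : List Int) (key : Int) : (pvIns s key).Perm (key :: s) := by
  unfold pvIns
  calc (s.take (s.countP (fun y => y ≤ key)) ++ key :: s.drop (s.countP (fun y => y ≤ key))).Perm
        (key :: (s.take (s.countP (fun y => y ≤ key)) ++ s.drop (s.countP (fun y => y ≤ key)))) :=
        List.perm_middle
    _ = key :: s := by rw [List.take_append_drop]

lemma pvFoldIns_perm (l : List Int) : ∀ init : List Int, (l.foldl pvIns init).Perm (init ++ l) := by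
  induction l with
  | nil => simp
  | cons x t ih =>
      intro init
      refine (ih (pvIns init x)).trans ?_
      exact ((pvIns_perm init x).append_right t).trans List.perm_middle.symm

lemma pvPfx_perm (A : List Int) (m : Nat) : (pvPfx A m).Perm (A.take m) := by
  simpa using pvFoldIns_perm (A.take m) []

-- in a sorted list the elements ≤ key are exactly the first countP of them
lemma pvCnt_split {s : List Int} (key : Int) (hs : s.Pairwise (· ≤ ·)) :
    (∀ x ∈ s.take (s.countP (fun y => y ≤ key)), x ≤ key) ∧
    (∀ x ∈ s.drop (s.countP (fun y => y ≤ key)), key < x) := by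
  induction s with
  | nil => simp
  | cons a t ih =>
      rcases List.pairwise_cons.mp hs with ⟨ha, ht⟩
      by_cases hak : a ≤ key
      · have hc : (a :: t).countP (fun y => y ≤ key) = t.countP (fun y => y ≤ key) + 1 := by
          simp [hak]
        rw [hc]
        rcases ih ht with ⟨h1, h2⟩
        constructor
        · intro x hx
          rcases (by simpa using hx : x = a ∨ x ∈ t.take (t.countP (fun y => y ≤ key))) with h | h
          · exact h ▸ hak
          · exact h1 x h
        · simpa using h2
      · have hc : (a :: t).countP (fun y => y ≤ key) = 0 := by
          have h0 : t.countP (fun y => y ≤ key) = 0 := by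
            rw [List.countP_eq_zero]
            intro x hx
            simpa using not_le.mpr (lt_of_lt_of_le (not_le.mp hak) (ha x hx))
          simp [hak, h0]
        rw [hc]
        refine ⟨by simp, ?_⟩
        intro x hx
        rcases (by simpa using hx : x = a ∨ x ∈ t) with h | h
        · exact h ▸ not_le.mp hak
        · exact lt_of_lt_of_le (not_le.mp hak) (ha x h)

lemma pvIns_sorted {s : List Int} (key : Int) (hs : s.Pairwise (· ≤ ·)) :
    (pvIns s key).Pairwise (· ≤ ·) := by
  rcases pvCnt_split key hs with ⟨h1, h2⟩
  unfold pvIns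
  rw [List.pairwise_append]
  refine ⟨hs.sublist (List.take_sublist _ _), ?_, ?_⟩
  · rw [List.pairwise_cons]
    exact ⟨fun x hx => le_of_lt (h2 x hx), hs.sublist (List.drop_sublist _ _)⟩
  · intro x hx y hy
    rcases (by simpa using hy : y = key ∨ y ∈ s.drop (s.countP (fun y => y ≤ key))) with h | h
    · exact h ▸ h1 x hx
    · exact le_of_lt (lt_of_le_of_lt (h1 x hx) (h2 y h))

lemma pvFoldIns_sorted (l : List Int) : ∀ init : List Int, init.Pairwise (· ≤ ·) →
    (l.foldl pvIns init).Pairwise (· ≤ ·) := by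
  induction l with
  | nil => intro init h; simpa using h
  | cons x t ih => intro init h; exact ih _ (pvIns_sorted x h)

lemma pvPfx_sorted (A : List Int) (m : Nat) : (pvPfx A m).Pairwise (· ≤ ·) :=
  pvFoldIns_sorted (A.take m) [] (by simp)

lemma pvFoldIns_length (l : List Int) : ∀ init : List Int,
    (l.foldl pvIns init).length = init.length + l.length := by
  induction l with
  | nil => simp
  | cons x t ih =>
      intro init
      rw [List.foldl_cons, ih]
      have : (pvIns init x).length = init.length + 1 := (pvIns_perm init x).length_eq.trans (by simp)
      rw [this, List.length_cons]; omega

lemma pvPfx_length (A : List Int) (m : Nat) (h : m ≤ A.length) : (pvPfx A m).length = m := by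
  unfold pvPfx
  rw [pvFoldIns_length]
  simp [min_eq_left h]

lemma pvGetDAppend (l t : List Int) (d : Int) : (l ++ t).getD l.length d = t.getD 0 d := by
  induction l with
  | nil => simp
  | cons a u ih => simpa using ih

lemma pvSetAppend (l r : List Int) (x d : Int) : (l ++ d :: r).set l.length x = l ++ x :: r := by
  induction l with
  | nil => simp
  | cons a u ih => simp [ih]

-- the shift loop, run on a sorted block s followed by a writable cell z,
-- ends at i = countP - 1 and, after the final write of key, yields pvIns s key
lemma pvShiftA_spec (s : List Int) (key z : Int) (rest : List Int)
    (hs : s.Pairwise (· ≤ ·)) :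
    (pvShiftA (s ++ z :: rest) key ((s.length : Int) - 1)).2
        = (s.countP (fun y => y ≤ key) : Int) - 1 ∧
    PySem.List.pySetD (pvShiftA (s ++ z :: rest) key ((s.length : Int) - 1)).1
        ((s.countP (fun y => y ≤ key) : Int) - 1 + 1) key
      = pvIns s key ++ rest := by
  induction s using List.reverseRecOn generalizing z rest with
  | nil =>
      rw [pvShiftA, dif_neg (by norm_num)]
      refine ⟨by norm_num, ?_⟩
      norm_num [pvIns, PySem.List.pySetD_of_nonneg]
  | append_singleton t a ih =>
      rcases List.pairwise_append.mp hs with ⟨ht, -, hcross⟩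
      have ha : ∀ x ∈ t, x ≤ a := fun x hx => hcross x hx a (by simp)
      have hlst : (t ++ [a]) ++ z :: rest = t ++ a :: z :: rest := by simp
      have hi : ((t ++ [a]).length : Int) - 1 = (t.length : Int) := by simp
      have hget : PySem.List.pyGetD ((t ++ [a]) ++ z :: rest) (t.length : Int) 0 = a := by
        rw [hlst, PySem.List.pyGetD_natCast, pvGetDAppend]
        simp
      by_cases hak : a ≤ key
      · have hct : t.countP (fun y => y ≤ key) = t.length :=
          List.countP_eq_length.mpr (fun x hx => by simpa using le_trans (ha x hx) hak)
        have hc : (t ++ [a]).countP (fun y => y ≤ key) = t.length + 1 := by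
          simp [List.countP_append, hct, hak]
        rw [hi, pvShiftA, dif_neg (by rw [hget]; exact fun hh => absurd hh.2 (not_lt.mpr hak))]
        rw [hc]
        refine ⟨by norm_num, ?_⟩
        have hidx : (((t.length + 1 : Nat)) : Int) - 1 + 1 = (((t ++ [a]).length : Nat) : Int) := by
          simp
        rw [hidx, PySem.List.pySetD_natCast, pvSetAppend]
        unfold pvIns
        rw [hc, List.take_of_length_le (by simp), List.drop_eq_nil_of_le (by simp)]
        simp
      · have hc : (t ++ [a]).countP (fun y => y ≤ key) = t.countP (fun y => y ≤ key) := by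
          simp [List.countP_append, hak]
        have hcle : t.countP (fun y => y ≤ key) ≤ t.length := List.countP_le_length
        rw [hi, pvShiftA, dif_pos ⟨by positivity, by rw [hget]; exact not_le.mp hak⟩]
        have hset : PySem.List.pySetD ((t ++ [a]) ++ z :: rest) ((t.length : Int) + 1)
            (PySem.List.pyGetD ((t ++ [a]) ++ z :: rest) (t.length : Int) 0)
            = t ++ a :: (a :: rest) := by
          rw [hget]
          have : ((t.length : Int) + 1) = (((t ++ [a]).length : Nat) : Int) := by simp
          rw [this, PySem.List.pySetD_natCast, pvSetAppend]
          simp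
        rw [hset]
        have hins : pvIns (t ++ [a]) key = pvIns t key ++ [a] := by
          unfold pvIns
          rw [hc, List.take_append_of_le_length hcle, List.drop_append_of_le_length hcle]
          simp
        rcases ih a (a :: rest) ht with ⟨ih2, ih1⟩
        refine ⟨by rw [ih2, hc], ?_⟩
        rw [hc, ih1, hins]
        simp

-- main invariant of the outer loop
lemma pvMainInv (A : List Int) (m : Nat) (h : m ≤ A.length) :
    (PySem.List.pyRange 0 (m : Int) 1).foldl pvStepA (A, List.replicate A.length 0)
      = (pvPfx A m ++ A.drop m,
         (List.range m).map (pvPos A) ++ List.replicate (A.length - m) 0) := by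
  induction m with
  | zero => simp [pvPfx, PySem.List.pyRange_one_eq_nil]
  | succ m ih =>
      have hm : m < A.length := by omega
      have hmle : m ≤ A.length := le_of_lt hm
      have hcast : ((m + 1 : Nat) : Int) = (m : Int) + 1 := by push_cast; ring
      rw [hcast, PySem.List.pyRange_one_succ_right (by positivity), List.foldl_append,
        ih hmle, List.foldl_cons, List.foldl_nil]
      set S := pvPfx A m with hS
      have hSlen : S.length = m := pvPfx_length A m hmle
      have hdrop : A.drop m = A[m] :: A.drop (m + 1) := List.drop_eq_getElem_cons hm
      have hkey : PySem.List.pyGetD (S ++ A.drop m) (m : Int) 0 = A[m] := by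
        rw [PySem.List.pyGetD_natCast, hdrop]
        have h' := pvGetDAppend S (A[m] :: A.drop (m + 1)) 0
        rw [hSlen] at h'
        rw [h']
        rfl
      have hsorted : S.Pairwise (· ≤ ·) := pvPfx_sorted A m
      have hiS : (m : Int) - 1 = ((S.length : Nat) : Int) - 1 := by rw [hSlen]
      simp only [pvStepA]
      rw [hkey, hdrop, hiS]
      rcases pvShiftA_spec S A[m] A[m] (A.drop (m + 1)) hsorted with ⟨h2, h1⟩
      set c := S.countP (fun y => y ≤ A[m]) with hcdef
      rw [h2, h1]
      have hPfx : pvPfx A (m + 1) = pvIns S A[m] := by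
        unfold pvPfx
        rw [List.take_succ_eq_append_getElem hm, List.foldl_append]
        rfl
      have hcount : c = (A.take m).countP (fun y => y ≤ A[m]) :=
        (pvPfx_perm A m).countP_eq _
      have hposv : (c : Int) - 1 + 2 = pvPos A m := by
        unfold pvPos
        rw [List.getD_eq_getElem A 0 hm, hcount]
        omega
      have hP : PySem.List.pySetD
          ((List.range m).map (pvPos A) ++ List.replicate (A.length - m) 0) (m : Int)
          ((c : Int) - 1 + 2)
          = (List.range (m + 1)).map (pvPos A) ++ List.replicate (A.length - (m + 1)) 0 := by
        have hrep : List.replicate (A.length - m) (0 : Int)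
            = 0 :: List.replicate (A.length - (m + 1)) 0 := by
          have : A.length - m = (A.length - (m + 1)) + 1 := by omega
          rw [this, List.replicate_succ]
        have hset' := pvSetAppend ((List.range m).map (pvPos A))
          (List.replicate (A.length - (m + 1)) 0) ((c : Int) - 1 + 2) 0
        rw [(by simp : ((List.range m).map (pvPos A)).length = m)] at hset'
        rw [PySem.List.pySetD_natCast, hrep, hset', List.range_succ, List.map_append, hposv]
        simp
      rw [hP, hPfx]

lemma pvEnumGet (A : List Int) : ∀ (s : Int) (j : Nat), (h : j < A.length) →
    (PySem.List.enumerate A s)[j]? = some (s + j, A[j]) := by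
  induction A with
  | nil => intro s j h; simp at h
  | cons a t ih =>
      intro s j h
      rw [PySem.List.enumerate_cons]
      cases j with
      | zero => simp
      | succ j =>
          have hj : j < t.length := by simpa using h
          rw [List.getElem?_cons_succ, ih (s + 1) j hj]
          simp only [List.getElem_cons_succ, Option.some.injEq, Prod.mk.injEq]
          constructor
          · push_cast; ring
          · simp

lemma pvSumIte (l : List Int) (k : Int) :
    (l.map (fun y => if y ≤ k then (1:Int) else 0)).sum = l.countP (fun y => y ≤ k) := by
  simpa using PySem.List.sum_map_ite_one_zero (fun y => decide (y ≤ k)) l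

lemma pvAltEq (A : List Int) :
    insertion_sort_and_track_positions_alt A = (List.range A.length).map (pvPos A) := by
  unfold insertion_sort_and_track_positions_alt
  apply List.ext_getElem
  · simp [PySem.List.length_enumerate]
  · intro j h1 h2
    have hj : j < A.length := by simpa [PySem.List.length_enumerate] using h1
    have hje : j < (PySem.List.enumerate A 0).length := by
      rw [PySem.List.length_enumerate]; exact hj
    have he : (PySem.List.enumerate A 0)[j]'hje = ((0 : Int) + j, A[j]) := by
      have h' := pvEnumGet A 0 j hj
      rw [List.getElem?_eq_getElem hje] at h'
      exact Option.some.inj h'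
    rw [List.getElem_map, List.getElem_map, he]
    simp only [List.getElem_range]
    have hz : (0 : Int) + (j : Int) = ((j : Nat) : Int) := by ring
    rw [hz, PySem.List.slice_to_natCast, pvSumIte]
    unfold pvPos
    rw [List.getD_eq_getElem A 0 hj]

-- ===== VERDICT (by name: the statement is the Claim_ definition above) =====
theorem insertion_sort_and_track_positions_spec : Claim_equal_insertion_sort_and_track_positions := by
  intro A _
  show _ = _
  rw [pvAltEq]
  unfold insertion_sort_and_track_positions
  rw [pvMainInv A A.length le_rfl]
  simp
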